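-- pv_equiv track=rewrite | github.com/Yash3561/reasoning_flow | src/generate_dataset.py | _auto_logic_names
-- ===== SOURCE A (Python) =====
-- from typing import Iterable, Optional, Dict, Any, List
--
-- def _auto_logic_names(n: int, prefix: str = "Logic") -> List[str]:
--     # LogicA..LogicZ, LogicAA.. if needed, else Logic1.. fallback
--     names: List[str] = []
--     alphabet = [chr(c) for c in range(ord('A'), ord('Z') + 1)]
--     # First 26 single letters
--     for i in range(min(n, 26)):
--         names.append(f"{prefix}{alphabet[i]}")
--     # Next use double letters
--     i = 26
--     while len(names) < n:
--         idx = i - 26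
--         a = alphabet[(idx // 26) % 26]
--         b = alphabet[idx % 26]
--         names.append(f"{prefix}{a}{b}")
--         i += 1
--     return names[:n]
-- ===== SOURCE B (Python) =====
-- from typing import List
--
-- def _auto_logic_names(n: int, prefix: str = "Logic") -> List[str]:
--     # Build the label table once (A..Z then AA..ZZ repeated as often as needed) and slice it.
--     alphabet = [chr(c) for c in range(ord('A'), ord('Z') + 1)]
--     doubles = [a + b for a in alphabet for b in alphabet]
--     m = max(n, 0)
--     seq = alphabet + doubles * (m // 676 + 1)
--     return [prefix + s for s in seq[:m]]
-- ===== Notes on version B (the rewrite author's own statement) =====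
-- stated objective: simpler
-- what changed: Replaces the per-index divmod while-loop with building the label table once (A..Z plus the AA..ZZ block repeated, reproducing the wrap for n>702) and slicing off the first max(n,0) entries.
import Mathlib
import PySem

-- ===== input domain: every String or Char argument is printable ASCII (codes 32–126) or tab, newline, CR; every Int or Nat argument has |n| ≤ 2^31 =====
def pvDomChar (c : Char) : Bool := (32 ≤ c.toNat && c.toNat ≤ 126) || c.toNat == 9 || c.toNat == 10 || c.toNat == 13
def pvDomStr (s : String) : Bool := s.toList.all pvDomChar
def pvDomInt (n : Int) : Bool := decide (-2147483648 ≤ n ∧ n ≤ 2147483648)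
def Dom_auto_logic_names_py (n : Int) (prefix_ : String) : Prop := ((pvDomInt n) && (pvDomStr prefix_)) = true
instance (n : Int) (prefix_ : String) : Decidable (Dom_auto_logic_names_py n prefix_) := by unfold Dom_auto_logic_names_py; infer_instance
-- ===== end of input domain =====

-- B builds the whole label table once (A..Z plus the repeated AA..ZZ block) and slices it,
-- instead of A's per-index divmod while-loop (objective: simpler).

-- ===== PORT A =====
-- alphabet = [chr(c) for c in range(ord('A'), ord('Z') + 1)]  (labels kept as List Char; strings are assembled with String.ofList)
def pvAlpha : List (List Char) := (PySem.List.pyRange 65 91 1).map (fun c => [Char.ofNat c.toNat])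

-- the 'while len(names) < n' loop; fuel = (n - len(names)).toNat, exactly the number of iterations left
def pvWhileA (n : Int) (p : List Char) : Nat → List String → Int → List String
  | 0, names, _ => names
  | fuel + 1, names, i =>
    if (names.length : Int) < n then
      let idx := i - 26
      let a := (PySem.List.pyGet? pvAlpha (PySem.Int.mod (PySem.Int.floordiv idx 26) 26)).getD []
      let b := (PySem.List.pyGet? pvAlpha (PySem.Int.mod idx 26)).getD []
      pvWhileA n p fuel (names ++ [String.ofList (p ++ a ++ b)]) (i + 1)
    else names

def auto_logic_names_py (n : Int) (prefix_ : String) : List String :=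
  let names := (PySem.List.pyRange 0 (min n 26) 1).map
      (fun i => String.ofList (prefix_.toList ++ (PySem.List.pyGet? pvAlpha i).getD []))
  let names2 := pvWhileA n prefix_.toList ((n - names.length).toNat) names 26
  PySem.List.slice names2 none (some n)

-- ===== PORT B =====
def auto_logic_names_py_alt (n : Int) (prefix_ : String) : List String :=
  let alphabet := (PySem.List.pyRange 65 91 1).map (fun c => [Char.ofNat c.toNat])
  let doubles := alphabet.flatMap (fun a => alphabet.map (fun b => a ++ b))
  let m := max n 0
  let seq := alphabet ++ (List.replicate (PySem.Int.floordiv m 676 + 1).toNat doubles).flatten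
  (PySem.List.slice seq none (some m)).map (fun s => String.ofList (prefix_.toList ++ s))

-- ===== PRECONDITION & SPEC =====
def Spec_auto_logic_names_py (n : Int) (prefix_ : String) (out : List String) : Prop := out = auto_logic_names_py_alt n prefix_
instance (n : Int) (prefix_ : String) (out : List String) : Decidable (Spec_auto_logic_names_py n prefix_ out) := by unfold Spec_auto_logic_names_py; infer_instance

-- ===== CLAIM (what is proved, stated in full; the proofs are below) =====
def Claim_equal_auto_logic_names_py : Prop := ∀ (n : Int) (prefix_ : String), Dom_auto_logic_names_py n prefix_ → Spec_auto_logic_names_py n prefix_ (auto_logic_names_py n prefix_)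

-- ===== LEMMAS AND PROOFS =====

-- proof-only: the doubles table, the label at index k, and A's loop body as a function of the raw index
def pvD : List (List Char) := pvAlpha.flatMap (fun a => pvAlpha.map (fun b => a ++ b))

def pvLab (k : Nat) : List Char :=
  if k < 26 then pvAlpha.getD k [] else pvD.getD ((k - 26) % 676) []

def pvF (p : List Char) (t : Int) : String :=
  String.ofList (p ++ (PySem.List.pyGet? pvAlpha (PySem.Int.mod (PySem.Int.floordiv t 26) 26)).getD []
                   ++ (PySem.List.pyGet? pvAlpha (PySem.Int.mod t 26)).getD [])

lemma pvAlpha_len : pvAlpha.length = 26 := by decide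

set_option maxRecDepth 100000 in
lemma pvD_len : pvD.length = 676 := by decide

set_option maxRecDepth 100000 in
set_option maxHeartbeats 1000000 in
lemma pvD_spec : ∀ j, j < 676 → pvD.getD j [] = pvAlpha.getD (j / 26) [] ++ pvAlpha.getD (j % 26) [] := by decide

lemma accA (u : Nat) :
    (PySem.List.pyGet? pvAlpha (PySem.Int.mod (PySem.Int.floordiv (u : Int) 26) 26)).getD [] =
      pvAlpha.getD (u / 26 % 26) [] := by
  rw [PySem.Int.floordiv_eq_ediv_of_pos (by norm_num), PySem.Int.mod_eq_emod_of_pos (by norm_num)]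
  have h : ((u : Int) / 26) % 26 = ((u / 26 % 26 : Nat) : Int) := by push_cast; rfl
  rw [h, PySem.List.pyGet?_natCast, ← List.getD_eq_getElem?_getD]

lemma accB (u : Nat) :
    (PySem.List.pyGet? pvAlpha (PySem.Int.mod (u : Int) 26)).getD [] = pvAlpha.getD (u % 26) [] := by
  rw [PySem.Int.mod_eq_emod_of_pos (by norm_num)]
  have h : (u : Int) % 26 = ((u % 26 : Nat) : Int) := by push_cast; rfl
  rw [h, PySem.List.pyGet?_natCast, ← List.getD_eq_getElem?_getD]

lemma pvF_lab (p : List Char) (j : Nat) : pvF p (j : Int) = String.ofList (p ++ pvLab (26 + j)) := by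
  unfold pvF pvLab
  rw [accA, accB, if_neg (by omega)]
  rw [pvD_spec ((26 + j - 26) % 676) (by omega)]
  rw [List.append_assoc,
    show (26 + j - 26) % 676 / 26 = j / 26 % 26 from by omega,
    show (26 + j - 26) % 676 % 26 = j % 26 from by omega]

lemma whileA_eq (n : Int) (p : List Char) :
    ∀ (fuel : Nat) (names : List String) (i : Int), (names.length : Int) + fuel = n →
      pvWhileA n p fuel names i =
        names ++ (List.range fuel).map (fun (j : Nat) => pvF p (i - 26 + (j : Int))) := by
  intro fuel
  induction fuel with
  | zero => intro names i _; simp [pvWhileA]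
  | succ fuel ih =>
    intro names i h
    have hlt : (names.length : Int) < n := by omega
    show (if (names.length : Int) < n then
        pvWhileA n p fuel (names ++ [String.ofList (p
          ++ (PySem.List.pyGet? pvAlpha (PySem.Int.mod (PySem.Int.floordiv (i - 26) 26) 26)).getD []
          ++ (PySem.List.pyGet? pvAlpha (PySem.Int.mod (i - 26) 26)).getD [])]) (i + 1)
      else names) = _
    rw [if_pos hlt,
      ih _ (i + 1) (by simp only [List.length_append, List.length_cons, List.length_nil]; push_cast at h ⊢; omega)]
    rw [List.range_succ_eq_map, List.map_cons, List.map_map, List.append_assoc]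
    congr 1
    rw [List.cons_append, List.nil_append]
    congr 1
    · show pvF p (i - 26) = pvF p (i - 26 + ((0 : Nat) : Int)); norm_num
    · apply List.map_congr_left; intro j _
      show pvF p (i + 1 - 26 + (j : Int)) = pvF p (i - 26 + ((j + 1 : Nat) : Int))
      congr 1; push_cast; ring

lemma A_eq (n : Int) (p : String) :
    auto_logic_names_py n p = (List.range n.toNat).map (fun k => String.ofList (p.toList ++ pvLab k)) := by
  unfold auto_logic_names_py
  by_cases hn : n ≤ 0
  · rw [PySem.List.pyRange_one_eq_nil (by omega)]
    simp only [List.map_nil, List.length_nil, Nat.cast_zero, sub_zero]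
    rw [show n.toNat = 0 from by omega]
    simp only [List.range_zero, List.map_nil]
    show PySem.List.slice ([] : List String) none (some n) = []
    simp [PySem.List.slice]
  · replace hn : 0 < n := by omega
    set m := n.toNat with hm
    set c := min m 26 with hc
    show PySem.List.slice
        (pvWhileA n p.toList
          ((n - (((PySem.List.pyRange 0 (min n 26) 1).map
              (fun i => String.ofList (p.toList ++ (PySem.List.pyGet? pvAlpha i).getD []))).length : Int)).toNat)
          ((PySem.List.pyRange 0 (min n 26) 1).map
              (fun i => String.ofList (p.toList ++ (PySem.List.pyGet? pvAlpha i).getD []))) 26)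
        none (some n) = _
    have h1 : (PySem.List.pyRange 0 (min n 26) 1).map
        (fun i => String.ofList (p.toList ++ (PySem.List.pyGet? pvAlpha i).getD [])) =
        (List.range c).map (fun k => String.ofList (p.toList ++ pvLab k)) := by
      rw [PySem.List.pyRange_one]
      rw [show (min n 26 - 0).toNat = c from by omega, List.map_map]
      apply List.map_congr_left; intro k hk
      have hk26 : k < 26 := by have := List.mem_range.mp hk; omega
      show String.ofList (p.toList ++ (PySem.List.pyGet? pvAlpha (0 + (k : Int))).getD []) = _
      rw [zero_add, PySem.List.pyGet?_natCast, ← List.getD_eq_getElem?_getD]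
      rw [pvLab, if_pos hk26]
    rw [h1]
    rw [show ((List.range c).map (fun k => String.ofList (p.toList ++ pvLab k))).length = c
      from by simp]
    rw [show (n - (c : Int)).toNat = m - c from by omega]
    rw [whileA_eq n p.toList (m - c) _ 26 (by simp only [List.length_map, List.length_range]; omega)]
    have h2 : (List.range (m - c)).map (fun (j : Nat) => pvF p.toList (26 - 26 + (j : Int))) =
        (List.range (m - c)).map (fun j => String.ofList (p.toList ++ pvLab (26 + j))) := by
      apply List.map_congr_left; intro j _
      rw [show (26 : Int) - 26 + (j : Int) = (j : Int) from by ring, pvF_lab]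
    rw [h2]
    have hlen2 : ((List.range c).map (fun k => String.ofList (p.toList ++ pvLab k)) ++
        (List.range (m - c)).map (fun j => String.ofList (p.toList ++ pvLab (26 + j)))).length = m := by
      simp only [List.length_append, List.length_map, List.length_range]; omega
    rw [PySem.List.slice_to _ (by omega)]
    rw [show n.toNat = ((List.range c).map (fun k => String.ofList (p.toList ++ pvLab k)) ++
        (List.range (m - c)).map (fun j => String.ofList (p.toList ++ pvLab (26 + j)))).length
      from by rw [hlen2]]
    rw [List.take_length]
    rw [show m = c + (m - c) from by omega, List.range_add, List.map_append, List.map_map]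
    congr 1
    rw [show c + (m - c) - c = m - c from by omega]
    apply List.map_congr_left; intro j hj
    have hj' : j < m - c := List.mem_range.mp hj
    have hc26 : c + j = 26 + j := by omega
    show String.ofList (p.toList ++ pvLab (26 + j)) = String.ofList (p.toList ++ pvLab (c + j))
    rw [hc26]

lemma flatten_replicate_len : ∀ r : Nat, ((List.replicate r pvD).flatten).length = r * 676 := by
  intro r
  induction r with
  | zero => simp
  | succ r ih => rw [List.replicate_succ, List.flatten_cons, List.length_append, ih, pvD_len]; ring

lemma flatten_replicate_getD : ∀ (r j : Nat), j < r * 676 →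
    ((List.replicate r pvD).flatten).getD j [] = pvD.getD (j % 676) [] := by
  intro r
  induction r with
  | zero => intro j hj; omega
  | succ r ih =>
    intro j hj
    rw [List.replicate_succ, List.flatten_cons]
    by_cases h : j < 676
    · rw [List.getD_append _ _ _ _ (by rw [pvD_len]; omega), Nat.mod_eq_of_lt h]
    · rw [List.getD_append_right _ _ _ _ (by rw [pvD_len]; omega), pvD_len,
        ih (j - 676) (by omega), show (j - 676) % 676 = j % 676 from by omega]

set_option maxRecDepth 100000 in
lemma B_eq (n : Int) (p : String) :
    auto_logic_names_py_alt n p = (List.range n.toNat).map (fun k => String.ofList (p.toList ++ pvLab k)) := by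
  simp only [auto_logic_names_py_alt]
  rw [show (PySem.List.pyRange 65 91 1).map (fun c => [Char.ofNat c.toNat]) = pvAlpha from rfl]
  rw [show pvAlpha.flatMap (fun a => pvAlpha.map (fun b => a ++ b)) = pvD from rfl]
  rw [PySem.Int.floordiv_eq_ediv_of_pos (by norm_num)]
  set m' : Int := max n 0 with hm'
  have hm'0 : 0 ≤ m' := by omega
  set q : Nat := (m' / 676).toNat with hq
  rw [show (m' / 676 + 1).toNat = q + 1 from by omega]
  set m : Nat := n.toNat with hm
  have hmm' : (m : Int) = m' := by omega
  have hmq : m ≤ 676 * q + 676 := by omega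
  rw [PySem.List.slice_to _ hm'0]
  rw [show m'.toNat = m from by omega]
  have hkey : (pvAlpha ++ (List.replicate (q + 1) pvD).flatten).take m = (List.range m).map pvLab := by
    apply List.ext_getElem
    · rw [List.length_take, List.length_append, pvAlpha_len, flatten_replicate_len,
        List.length_map, List.length_range]
      omega
    · intro k hk1 hk2
      rw [List.getElem_take, List.getElem_map, List.getElem_range]
      have hkm : k < m := by
        rw [List.length_map, List.length_range] at hk2; omega
      by_cases h26 : k < 26
      · rw [List.getElem_append_left (by rw [pvAlpha_len]; omega)]
        rw [pvLab, if_pos h26, List.getD_eq_getElem pvAlpha [] (by rw [pvAlpha_len]; omega)]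
      · rw [List.getElem_append_right (by rw [pvAlpha_len]; omega)]
        rw [pvLab, if_neg h26]
        have hlt : k - pvAlpha.length < ((List.replicate (q + 1) pvD).flatten).length := by
          rw [flatten_replicate_len, pvAlpha_len]; omega
        rw [← List.getD_eq_getElem _ [] hlt, pvAlpha_len,
          flatten_replicate_getD (q + 1) (k - 26) (by omega)]
  rw [hkey, List.map_map]
  rfl

-- ===== VERDICT (by name: the statement is the Claim_ definition above) =====
theorem auto_logic_names_py_spec : Claim_equal_auto_logic_names_py := by
  intro n prefix_ _
  unfold Spec_auto_logic_names_py
  rw [A_eq, B_eq]
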